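-- pv_equiv track=rewrite | github.com/Sekizyo/LeetCode | 0014-longest-common-prefix/0014-longest-common-prefix.py | check
-- ===== SOURCE A (Python) =====
-- def check(lst:list[str]) -> bool:
--     dict_ = {}
--     for word in lst:
--         if not word in dict_.keys():
--             dict_[word] = 1
--         else:
--             dict_[word] += 1
--
--     if len(dict_.keys()) == 1:
--         return True
--     return False
-- ===== SOURCE B (Python) =====
-- def check(lst: list[str]) -> bool:
--     if not lst:
--         return False
--     first = lst[0]
--     for x in lst[1:]:
--         if x != first:
--             return False
--     return True
-- ===== Notes on version B (the rewrite author's own statement) =====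
-- stated objective: simpler
-- what changed: B drops A's frequency dict entirely: it compares every later element against the first with an early-exit loop instead of building a counter table and counting its keys.
import Mathlib
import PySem

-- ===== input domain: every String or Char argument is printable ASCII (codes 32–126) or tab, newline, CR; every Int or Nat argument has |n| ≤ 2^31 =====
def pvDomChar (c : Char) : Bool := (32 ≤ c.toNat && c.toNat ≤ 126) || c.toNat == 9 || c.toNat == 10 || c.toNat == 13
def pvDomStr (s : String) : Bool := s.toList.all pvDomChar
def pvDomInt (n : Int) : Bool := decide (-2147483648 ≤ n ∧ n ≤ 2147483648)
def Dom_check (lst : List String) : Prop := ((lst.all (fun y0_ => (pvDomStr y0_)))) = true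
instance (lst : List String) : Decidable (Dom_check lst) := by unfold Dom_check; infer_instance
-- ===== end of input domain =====

-- B replaces A's frequency dict by an early-exit comparison of every element with the first (simpler).

-- ===== PORT A =====
-- the loop body: if word not in dict_.keys(): dict_[word] = 1 else: dict_[word] += 1
def checkStep (d : PySem.Dict String Int) (word : String) : PySem.Dict String Int :=
  if d.contains word = false then d.insert word 1 else d.modify word 0 (· + 1)

def check (lst : List String) : Bool :=
  let d := lst.foldl checkStep PySem.Dict.empty
  if d.keys.length = 1 then true else false

-- ===== PORT B =====
-- for x in lst[1:]: if x != first: return False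
def allEqTo (first : String) : List String → Bool
  | [] => true
  | x :: xs => if x ≠ first then false else allEqTo first xs

def check_alt (lst : List String) : Bool :=
  match lst with
  | [] => false
  | first :: rest => allEqTo first rest

-- ===== PRECONDITION & SPEC =====
def Spec_check (lst : List String) (out : Bool) : Prop := out = check_alt lst
instance (lst : List String) (out : Bool) : Decidable (Spec_check lst out) := by unfold Spec_check; infer_instance

-- ===== CLAIM (what is proved, stated in full; the proofs are below) =====
def Claim_equal_check : Prop := ∀ (lst : List String), Dom_check lst → Spec_check lst (check lst)

-- ===== LEMMAS AND PROOFS =====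

-- the keys of A's dict after the loop are exactly the distinct words, in first-occurrence order
theorem checkLoop_keys (lst : List String) (d : PySem.Dict String Int) :
    (lst.foldl checkStep d).keys = PySem.Set.update d.keys lst := by
  induction lst generalizing d with
  | nil => simp [PySem.Set.update]
  | cons x xs ih =>
    rw [List.foldl_cons, ih, PySem.Set.update_cons]
    congr 1
    unfold checkStep
    by_cases h : d.contains x = false
    · rw [if_pos h, PySem.Dict.keys_insert_of_not_contains _ _ h,
        PySem.Set.add_of_not_mem]
      intro hm
      rw [← PySem.Dict.contains_iff_mem_keys] at hm
      simp [hm] at h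
    · rw [if_neg h, PySem.Dict.keys_modify,
        PySem.Dict.keys_insert_of_contains _ _ (by simpa using h),
        PySem.Set.add_of_mem]
      rw [← PySem.Dict.contains_iff_mem_keys]
      simpa using h

theorem allEqTo_eq_true (first : String) (xs : List String) :
    allEqTo first xs = true ↔ ∀ y ∈ xs, y = first := by
  induction xs with
  | nil => simp [allEqTo]
  | cons x xs ih =>
    simp only [allEqTo]
    by_cases h : x = first
    · simp [h, ih]
    · simp [h]

-- ===== VERDICT (by name: the statement is the Claim_ definition above) =====
theorem check_spec : Claim_equal_check := by
  intro lst _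
  unfold Spec_check
  show (if (List.foldl checkStep PySem.Dict.empty lst).keys.length = 1 then true else false) = check_alt lst
  unfold check_alt
  rw [checkLoop_keys]
  have hkeys : PySem.Set.update (PySem.Dict.empty : PySem.Dict String Int).keys lst
      = PySem.Set.ofList lst := by
    simp [PySem.Dict.keys_empty, PySem.Set.update_nil_left]
  rw [hkeys]
  cases lst with
  | nil => simp [PySem.Set.ofList]
  | cons first rest =>
    rw [PySem.Set.ofList_cons]
    simp only [List.length_cons]
    by_cases h : allEqTo first rest = true
    · have hall := (allEqTo_eq_true first rest).1 h
      have : PySem.Set.discard (PySem.Set.ofList rest) first = [] := by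
        rw [List.eq_nil_iff_forall_not_mem]
        intro y hy
        rw [PySem.Set.mem_discard] at hy
        exact hy.2 (hall y ((PySem.Set.mem_ofList _ _).1 hy.1))
      simp [this, h]
    · have : PySem.Set.discard (PySem.Set.ofList rest) first ≠ [] := by
        rw [allEqTo_eq_true] at h
        push Not at h
        obtain ⟨y, hy, hne⟩ := h
        intro hnil
        have : y ∈ PySem.Set.discard (PySem.Set.ofList rest) first := by
          rw [PySem.Set.mem_discard, PySem.Set.mem_ofList _ _]
          exact ⟨hy, hne⟩
        simp [hnil] at this
      have hlen : (PySem.Set.discard (PySem.Set.ofList rest) first).length ≠ 0 := by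
        simpa [List.length_eq_zero_iff] using this
      rw [if_neg (by omega)]
      simpa using h
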